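-- pv_equiv track=rewrite | github.com/VojtaStruhar/adventofcode | 2024_Python/02_Red_Nosed_Reports/task2.py | violating_index
-- ===== SOURCE A (Python) =====
-- def violating_index(report: list[int]) -> int | None:
--     p_diff = report[0] - report[1]
--     if not 1 <= abs(p_diff) <= 3:
--         return 1
--
--     for i in range(2, len(report)):
--         diff = report[i - 1] - report[i]
--         if not 1 <= abs(diff) <= 3:
--             return i
--         if (p_diff < 0) != (diff < 0):
--             return i
--
--         p_diff = diff
--
--     return None
-- ===== SOURCE B (Python) =====
-- def violating_index(report: list[int]) -> int | None:
--     # Backward scan: walk the indices from the end keeping the leftmost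
--     # violation seen, judging each difference against the fixed sign of the
--     # first difference (stateless predicate; no rolling previous value).
--     decreasing = report[0] - report[1] < 0
--     res = None
--     for i in range(len(report) - 1, 0, -1):
--         d = report[i - 1] - report[i]
--         if not 1 <= abs(d) <= 3 or (d < 0) != decreasing:
--             res = i
--     return res
-- ===== Notes on version B (the rewrite author's own statement) =====
-- stated objective: alternative
-- what changed: B scans the indices backward (range(len-1, 0, -1)) keeping the leftmost violation seen, judging each difference with a stateless test against the fixed sign of the first difference, instead of A's forward loop threading a rolling previous-difference state with early returns.
import Mathlib
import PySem

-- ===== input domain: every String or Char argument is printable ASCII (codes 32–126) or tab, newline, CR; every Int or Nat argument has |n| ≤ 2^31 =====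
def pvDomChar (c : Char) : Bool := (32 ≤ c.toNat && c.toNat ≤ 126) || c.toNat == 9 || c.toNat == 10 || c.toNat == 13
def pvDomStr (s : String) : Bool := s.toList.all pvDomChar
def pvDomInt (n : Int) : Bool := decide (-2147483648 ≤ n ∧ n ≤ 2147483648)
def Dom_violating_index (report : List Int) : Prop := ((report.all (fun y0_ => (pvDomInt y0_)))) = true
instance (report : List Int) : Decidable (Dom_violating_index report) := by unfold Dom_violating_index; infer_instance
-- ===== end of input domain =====

-- B replaces A's forward loop with rolling previous-difference state by a backward index scan
-- keeping the leftmost violation, judged by a stateless test against the first difference's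
-- sign (objective: alternative decomposition; traversal reversed, no threaded state).

-- ===== PORT A =====
-- A's for-loop over i in range(2, len(report)) with rolling state p_diff.
def violatingLoopA (report : List Int) (p_diff : Int) (i : Nat) : Option Int :=
  if i < report.length then
    let diff := PySem.List.pyGetD report ((i : Int) - 1) 0 - PySem.List.pyGetD report (i : Int) 0
    if ¬ (1 ≤ |diff| ∧ |diff| ≤ 3) then some (i : Int)
    else if (decide (p_diff < 0)) ≠ (decide (diff < 0)) then some (i : Int)
    else violatingLoopA report diff (i + 1)
  else none
termination_by report.length - i

def violating_index (report : List Int) : Option Int :=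
  let p_diff := PySem.List.pyGetD report 0 0 - PySem.List.pyGetD report 1 0
  if ¬ (1 ≤ |p_diff| ∧ |p_diff| ≤ 3) then some 1
  else violatingLoopA report p_diff 2

-- ===== PORT B =====
-- B's for-loop over i in range(len(report) - 1, 0, -1), overwriting res with the current
-- (smaller) index whenever the stateless violation test fires.
def violating_index_alt (report : List Int) : Option Int :=
  let decreasing := decide (PySem.List.pyGetD report 0 0 - PySem.List.pyGetD report 1 0 < 0)
  let res := (PySem.List.pyRange ((report.length : Int) - 1) 0 (-1)).foldl
    (fun res i =>
      let d := PySem.List.pyGetD report (i - 1) 0 - PySem.List.pyGetD report i 0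
      if ¬ (1 ≤ |d| ∧ |d| ≤ 3) ∨ decide (d < 0) ≠ decreasing then some i else res)
    none
  res

-- ===== PRECONDITION & SPEC =====
-- A raises IndexError (report[1]) when the report has fewer than two elements; B raises there too.
def Pre_violating_index (report : List Int) : Prop := 2 ≤ report.length
instance (report : List Int) : Decidable (Pre_violating_index report) := by unfold Pre_violating_index; infer_instance
def pvWitness_violating_index : List Int := ([1, 2, 3])

def Spec_violating_index (report : List Int) (out : Option Int) : Prop := out = violating_index_alt report
instance (report : List Int) (out : Option Int) : Decidable (Spec_violating_index report out) := by unfold Spec_violating_index; infer_instance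

-- ===== CLAIM (what is proved, stated in full; the proofs are below) =====
def Claim_equal_violating_index : Prop := ∀ (report : List Int), Dom_violating_index report → Pre_violating_index report → Spec_violating_index report (violating_index report)

-- ===== LEMMAS AND PROOFS =====

-- Stateless violation test at position i (the difference report[i-1] - report[i] is out of
-- magnitude range, or its sign disagrees with the fixed flag dec).
abbrev viol (report : List Int) (dec : Bool) (i : Int) : Prop :=
  let d := PySem.List.pyGetD report (i - 1) 0 - PySem.List.pyGetD report i 0
  ¬ (1 ≤ |d| ∧ |d| ≤ 3) ∨ decide (d < 0) ≠ dec

-- First index j with i ≤ j ≤ k and viol j, else acc.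
def ffst (report : List Int) (dec : Bool) (i : Nat) (k : Int) (acc : Option Int) : Option Int :=
  if (i : Int) ≤ k then
    (if viol report dec (i : Int) then some (i : Int) else ffst report dec (i + 1) k acc)
  else acc
termination_by (k + 1 - i).toNat
decreasing_by omega

theorem ffst_le (report : List Int) (dec : Bool) (i : Nat) (k : Int) (acc : Option Int)
    (h : (i : Int) ≤ k) :
    ffst report dec i k acc
      = if viol report dec (i : Int) then some (i : Int) else ffst report dec (i + 1) k acc := by
  rw [ffst, if_pos h]

theorem ffst_gt (report : List Int) (dec : Bool) (i : Nat) (k : Int) (acc : Option Int)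
    (h : ¬ (i : Int) ≤ k) : ffst report dec i k acc = acc := by
  rw [ffst, if_neg h]

-- Peeling the LAST index off the searched interval: searching i..m+1 from acc equals
-- searching i..m from the updated accumulator.
theorem ffst_succ_right (report : List Int) (dec : Bool) (m : Nat) (acc : Option Int)
    (i : Nat) (hik : i ≤ m + 1) :
    ffst report dec i ((m : Int) + 1) acc
      = ffst report dec i (m : Int)
          (if viol report dec ((m : Int) + 1) then some ((m : Int) + 1) else acc) := by
  generalize hfuel : m + 1 - i = fuel
  induction fuel generalizing i with
  | zero =>
    have hi : i = m + 1 := by omega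
    subst hi
    rw [ffst_le report dec (m + 1) ((m : Int) + 1) acc (by omega),
        ffst_gt report dec (m + 1) (m : Int) _ (by omega)]
    have hc : ((m + 1 : Nat) : Int) = (m : Int) + 1 := by push_cast; ring
    rw [hc]
    by_cases hv : viol report dec ((m : Int) + 1)
    · rw [if_pos hv, if_pos hv]
    · rw [if_neg hv, if_neg hv,
        ffst_gt report dec (m + 1 + 1) ((m : Int) + 1) acc (by push_cast; omega)]
  | succ fuel ih =>
    have hi : i ≤ m := by omega
    rw [ffst_le report dec i ((m : Int) + 1) acc (by omega),
        ffst_le report dec i (m : Int) _ (by omega)]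
    by_cases hv : viol report dec (i : Int)
    · rw [if_pos hv, if_pos hv]
    · rw [if_neg hv, if_neg hv]
      exact ih (i + 1) (by omega) (by omega)

-- B's backward fold over range(m, 0, -1) computes the forward first-violation search over 1..m.
theorem fold_eq_ffst (report : List Int) (dec : Bool) (m : Nat) (acc : Option Int) :
    (PySem.List.pyRange ((m : Nat) : Int) 0 (-1)).foldl
      (fun res i =>
        let d := PySem.List.pyGetD report (i - 1) 0 - PySem.List.pyGetD report i 0
        if ¬ (1 ≤ |d| ∧ |d| ≤ 3) ∨ decide (d < 0) ≠ dec then some i else res)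
      acc = ffst report dec 1 ((m : Nat) : Int) acc := by
  induction m generalizing acc with
  | zero =>
    have h0 : PySem.List.pyRange (((0 : Nat) : Nat) : Int) 0 (-1) = [] :=
      PySem.List.pyRange_neg_one_eq_nil (by simp)
    rw [h0, ffst_gt report dec 1 (((0 : Nat) : Nat) : Int) acc (by simp)]
    rfl
  | succ m ih =>
    rw [PySem.List.pyRange_neg_one_cons (by push_cast; omega), List.foldl_cons]
    have hstep : ((m + 1 : Nat) : Int) - 1 = ((m : Nat) : Int) := by push_cast; ring
    rw [hstep, ih]
    have hc : ((m + 1 : Nat) : Int) = ((m : Nat) : Int) + 1 := by push_cast; ring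
    rw [hc, ffst_succ_right report dec m _ 1 (by omega)]
    congr 1
    simp only [viol]
    norm_num

-- A's loop from index i with rolling state p_diff agrees with the stateless forward search,
-- provided p_diff's sign is the fixed flag.
theorem loopA_eq_ffst (report : List Int) (dec : Bool) (p_diff : Int) (i : Nat)
    (hsign : decide (p_diff < 0) = dec) :
    violatingLoopA report p_diff i = ffst report dec i ((report.length : Int) - 1) none := by
  generalize hfuel : report.length - i = fuel
  induction fuel generalizing i p_diff with
  | zero =>
    rw [violatingLoopA, if_neg (by omega), ffst_gt _ _ _ _ _ (by omega)]
  | succ fuel ih =>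
    have hi : i < report.length := by omega
    rw [violatingLoopA, if_pos hi, ffst_le _ _ _ _ _ (by omega)]
    simp only [viol]
    generalize hd : PySem.List.pyGetD report ((i : Int) - 1) 0 - PySem.List.pyGetD report (i : Int) 0 = d
    by_cases hmag : 1 ≤ |d| ∧ |d| ≤ 3
    · rw [if_neg (not_not_intro hmag)]
      by_cases hs : decide (d < 0) = dec
      · rw [if_neg (by rw [hsign, hs]; simp), if_neg (by simp [hmag, hs]),
          ih d (i + 1) hs (by omega)]
      · rw [if_pos (by rw [hsign]; exact Ne.symm hs), if_pos (Or.inr hs)]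
    · rw [if_pos hmag, if_pos (Or.inl hmag)]

-- ===== VERDICT (by name: the statement is the Claim_ definition above) =====
theorem violating_index_spec : Claim_equal_violating_index := by
  intro report _ hpre
  have h2 : 2 ≤ report.length := hpre
  unfold Spec_violating_index violating_index violating_index_alt
  dsimp only
  set d0 := PySem.List.pyGetD report 0 0 - PySem.List.pyGetD report 1 0 with hd0
  set dec := decide (d0 < 0) with hdec
  have hm : ((report.length : Int) - 1) = ((report.length - 1 : Nat) : Int) := by omega
  rw [hm, fold_eq_ffst report dec (report.length - 1) none]
  have hv1 : viol report dec (((1 : Nat) : Nat) : Int) ↔ ¬ (1 ≤ |d0| ∧ |d0| ≤ 3) := by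
    simp only [viol, Nat.cast_one]
    have e1 : (1 : Int) - 1 = 0 := by norm_num
    rw [e1, ← hd0, ← hdec]
    simp
  rw [ffst_le report dec 1 _ none (by omega)]
  by_cases hmag : 1 ≤ |d0| ∧ |d0| ≤ 3
  · rw [if_neg (by simpa using hmag), if_neg (by rw [hv1]; simpa using hmag)]
    rw [loopA_eq_ffst report dec d0 2 (by rw [hdec]), hm]
  · rw [if_pos (by simpa using hmag), if_pos (by rw [hv1]; simpa using hmag)]
    norm_num
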